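-- pv_equiv track=rewrite | github.com/eliasmagn/postmarketOS_kiauh | kiauh/components/moonraker/assets/apk-update-manager-wrapper.py | _parse_subcommand
-- ===== SOURCE A (Python) =====
-- from typing import Iterable, List, Sequence
--
-- def _parse_subcommand(args: List[str]) -> tuple[str | None, List[str]]:
--     subcommand: str | None = None
--     remainder: List[str] = []
--     for arg in args:
--         if subcommand is None and arg.startswith("-"):
--             continue
--         if subcommand is None:
--             subcommand = arg
--             continue
--         remainder.append(arg)
--     return subcommand, remainder
-- ===== SOURCE B (Python) =====
-- from typing import List
--
--
-- def _parse_subcommand(args: List[str]) -> tuple[str | None, List[str]]: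
--     for i, a in enumerate(args):
--         if not a.startswith("-"):
--             return a, args[i + 1:]
--     return None, []
-- ===== Notes on version B (the rewrite author's own statement) =====
-- stated objective: simpler
-- what changed: Replaces A's one-pass state machine (subcommand-is-None flag plus an explicit remainder.append loop) with an early-return scan for the first non-flag argument and a single slice for the remainder.
import Mathlib
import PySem

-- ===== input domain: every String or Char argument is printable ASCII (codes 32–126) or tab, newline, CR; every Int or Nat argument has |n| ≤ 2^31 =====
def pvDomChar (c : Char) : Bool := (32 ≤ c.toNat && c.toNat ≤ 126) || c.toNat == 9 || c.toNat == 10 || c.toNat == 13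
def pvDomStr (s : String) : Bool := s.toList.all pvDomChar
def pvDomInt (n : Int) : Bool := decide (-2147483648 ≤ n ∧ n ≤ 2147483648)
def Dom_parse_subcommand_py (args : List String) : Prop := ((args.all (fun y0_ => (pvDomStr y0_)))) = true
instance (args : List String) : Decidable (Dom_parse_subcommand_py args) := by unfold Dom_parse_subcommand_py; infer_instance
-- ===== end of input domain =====

-- B replaces A's subcommand-is-None state machine and remainder-append loop by an early-return
-- scan for the first non-flag argument plus one slice (objective: simpler).

-- ===== PORT A =====
-- A's loop: state (subcommand, remainder), branches in source order.
def pvAGo : Option String → List String → List String → Option String × List String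
  | sub, rem, [] => (sub, rem)
  | none, rem, a :: t =>
      if PySem.Str.startswith a "-" then pvAGo none rem t
      else pvAGo (some a) rem t
  | some s, rem, a :: t => pvAGo (some s) (rem ++ [a]) t

def parse_subcommand_py (args : List String) : Option String × List String :=
  pvAGo none [] args

-- ===== PORT B =====
-- B's loop: for i, a in enumerate(args): on first non-flag return (a, args[i+1:]); else (None, []).
-- args[i+1:] with i+1 ≥ 0 is List.drop (i+1) (PySem.List.slice_from_natCast).
def pvBGo : Nat → List String → List String → Option String × List String
  | _, _, [] => (none, [])
  | i, orig, a :: t =>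
      if PySem.Str.startswith a "-" then pvBGo (i + 1) orig t
      else (some a, orig.drop (i + 1))

def parse_subcommand_py_alt (args : List String) : Option String × List String :=
  pvBGo 0 args args

-- ===== PRECONDITION & SPEC =====
def Spec_parse_subcommand_py (args : List String) (out : Option String × List String) : Prop := out = parse_subcommand_py_alt args
instance (args : List String) (out : Option String × List String) : Decidable (Spec_parse_subcommand_py args out) := by unfold Spec_parse_subcommand_py; infer_instance

-- ===== CLAIM (what is proved, stated in full; the proofs are below) =====
def Claim_equal_parse_subcommand_py : Prop := ∀ (args : List String), Dom_parse_subcommand_py args → Spec_parse_subcommand_py args (parse_subcommand_py args)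

-- ===== LEMMAS AND PROOFS =====
theorem pvAGo_some (s : String) (rem t : List String) :
    pvAGo (some s) rem t = (some s, rem ++ t) := by
  induction t generalizing rem with
  | nil => simp [pvAGo]
  | cons a t ih => simp [pvAGo, ih]

theorem pvBGo_eq (t : List String) :
    ∀ (i : Nat) (orig : List String), orig.drop i = t →
      pvBGo i orig t = pvAGo none [] t := by
  induction t with
  | nil => intro i orig _; rfl
  | cons a t ih =>
    intro i orig h
    have hdrop : orig.drop (i + 1) = t := by
      rw [← List.tail_drop, h]; rfl
    simp only [pvBGo, pvAGo]
    split_ifs with hs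
    · exact ih (i + 1) orig hdrop
    · simp [hdrop, pvAGo_some]

-- ===== VERDICT (by name: the statement is the Claim_ definition above) =====
theorem parse_subcommand_py_spec : Claim_equal_parse_subcommand_py := by
  intro args _
  unfold Spec_parse_subcommand_py parse_subcommand_py parse_subcommand_py_alt
  exact (pvBGo_eq args 0 args (by simp)).symm
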